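-- pv_equiv track=rewrite | github.com/mcmathews/DailyProgrammer | HeighwayDragonFractal/HeighwayDragonFractal.py | turnsToCoords
-- ===== SOURCE A (Python) =====
-- def turnsToCoords(turns):
-- 	coords = [(0, 0)]
--
-- 	curr = (0, 0)
-- 	d = 1
-- 	for turn in turns:
-- 		curr = step(curr, d)
--
-- 		d = (d + turn) % 4
--
-- 		coords.append(curr)
--
-- 	coords.append(step(curr, d))
--
-- 	return coords
--
-- def step(coord, d):
-- 	if d == 0:
-- 		c = coord[0], coord[1] + 1
-- 	elif d == 1:
-- 		c = coord[0] + 1, coord[1]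
-- 	elif d == 2:
-- 		c = coord[0], coord[1] - 1
-- 	elif d == 3:
-- 		c = coord[0] - 1, coord[1]
--
-- 	return c
-- ===== SOURCE B (Python) =====
-- _STEPS = {0: (0, 1), 1: (1, 0), 2: (0, -1), 3: (-1, 0)}
--
-- def turnsToCoords(turns):
--     # Pass 1: direction used at each of the n+1 steps (d before each turn's update).
--     dirs = [1]
--     d = 1
--     for t in turns:
--         d = (d + t) % 4
--         dirs.append(d)
--     # Pass 2: accumulate unit vectors from the origin.
--     coords = [(0, 0)]
--     x = y = 0
--     for d in dirs:
--         dx, dy = _STEPS[d]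
--         x += dx
--         y += dy
--         coords.append((x, y))
--     return coords
-- ===== Notes on version B (the rewrite author's own statement) =====
-- stated objective: alternative
-- what changed: Replaces A's single loop that mutates the current coordinate and direction together (calling a branchy step helper) with two passes: a cumulative scan producing the n+1 direction values, then accumulation of table-looked-up unit vectors from the origin.
import Mathlib
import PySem

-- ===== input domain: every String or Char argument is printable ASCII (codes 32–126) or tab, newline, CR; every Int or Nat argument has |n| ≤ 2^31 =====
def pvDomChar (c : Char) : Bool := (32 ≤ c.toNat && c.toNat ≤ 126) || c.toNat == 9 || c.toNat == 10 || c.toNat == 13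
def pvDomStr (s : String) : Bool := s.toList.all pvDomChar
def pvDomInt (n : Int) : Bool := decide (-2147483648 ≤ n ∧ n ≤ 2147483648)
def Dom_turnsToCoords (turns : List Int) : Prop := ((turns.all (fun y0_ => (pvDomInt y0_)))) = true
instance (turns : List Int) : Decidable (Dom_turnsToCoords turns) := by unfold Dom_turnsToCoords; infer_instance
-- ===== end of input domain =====

-- B replaces A's single mutate-curr-and-d loop by two passes: a cumulative direction scan
-- followed by position accumulation from a direction→unit-vector table (objective: alternative decomposition).

-- ===== PORT A =====
-- Python's step: the final elif covers d == 3; d is always (… % 4) ∈ {0,1,2,3} at every call,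
-- so the else branch here (taken only for d ∉ {0,1,2}) is exact on all reachable inputs.
def stepA (coord : Int × Int) (d : Int) : Int × Int :=
  if d == 0 then (coord.1, coord.2 + 1)
  else if d == 1 then (coord.1 + 1, coord.2)
  else if d == 2 then (coord.1, coord.2 - 1)
  else (coord.1 - 1, coord.2)

def turnsToCoords (turns : List Int) : List (Int × Int) :=
  let st := turns.foldl
    (fun (s : List (Int × Int) × (Int × Int) × Int) turn =>
      let curr := stepA s.2.1 s.2.2
      let d := PySem.Int.mod (s.2.2 + turn) 4
      (s.1 ++ [curr], curr, d))
    ([(0, 0)], (0, 0), 1)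
  st.1 ++ [stepA st.2.1 st.2.2]

-- ===== PORT B =====
-- _STEPS[d] as a function (the dict is total on the reachable keys 0..3; lookup order-irrelevant)
def stepVec (d : Int) : Int × Int :=
  if d == 0 then (0, 1)
  else if d == 1 then (1, 0)
  else if d == 2 then (0, -1)
  else (-1, 0)

def turnsToCoords_alt (turns : List Int) : List (Int × Int) :=
  let ds := turns.foldl
    (fun (s : List Int × Int) t =>
      let d := PySem.Int.mod (s.2 + t) 4
      (s.1 ++ [d], d))
    ([1], 1)
  let st := ds.1.foldl
    (fun (s : List (Int × Int) × Int × Int) d =>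
      let v := stepVec d
      let x := s.2.1 + v.1
      let y := s.2.2 + v.2
      (s.1 ++ [(x, y)], x, y))
    ([(0, 0)], 0, 0)
  st.1

-- ===== PRECONDITION & SPEC =====
def Spec_turnsToCoords (turns : List Int) (out : List (Int × Int)) : Prop := out = turnsToCoords_alt turns
instance (turns : List Int) (out : List (Int × Int)) : Decidable (Spec_turnsToCoords turns out) := by unfold Spec_turnsToCoords; infer_instance

-- ===== CLAIM (what is proved, stated in full; the proofs are below) =====
def Claim_equal_turnsToCoords : Prop := ∀ (turns : List Int), Dom_turnsToCoords turns → Spec_turnsToCoords turns (turnsToCoords turns)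

-- ===== LEMMAS AND PROOFS =====

-- the tail of B's direction list after seed d
def pvRest (d : Int) : List Int → List Int
  | [] => []
  | t :: ts => PySem.Int.mod (d + t) 4 :: pvRest (PySem.Int.mod (d + t) 4) ts

-- the walk: successive positions from (x,y) following direction list
def pvWalk (x y : Int) : List Int → List (Int × Int)
  | [] => []
  | d :: ds =>
    let v := stepVec d
    (x + v.1, y + v.2) :: pvWalk (x + v.1) (y + v.2) ds

theorem stepA_eq_add (c : Int × Int) (d : Int) :
    stepA c d = (c.1 + (stepVec d).1, c.2 + (stepVec d).2) := by
  unfold stepA stepVec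
  split_ifs <;> simp <;> omega

theorem foldA_eq (ts : List Int) : ∀ (coords : List (Int × Int)) (x y d : Int),
    (let st := ts.foldl
      (fun (s : List (Int × Int) × (Int × Int) × Int) turn =>
        let curr := stepA s.2.1 s.2.2
        let d := PySem.Int.mod (s.2.2 + turn) 4
        (s.1 ++ [curr], curr, d))
      (coords, (x, y), d)
     st.1 ++ [stepA st.2.1 st.2.2])
    = coords ++ pvWalk x y (d :: pvRest d ts) := by
  induction ts with
  | nil => intro coords x y d; simp [pvRest, pvWalk, stepA_eq_add]
  | cons t ts ih =>
    intro coords x y d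
    simp only [List.foldl_cons, pvRest, pvWalk]
    have := ih (coords ++ [stepA (x, y) d]) (x + (stepVec d).1) (y + (stepVec d).2)
      (PySem.Int.mod (d + t) 4)
    simp only [stepA_eq_add, pvWalk] at this ⊢
    rw [this, List.append_assoc]
    rfl

theorem foldDirs_fst (ts : List Int) : ∀ (acc : List Int) (d : Int),
    (ts.foldl
      (fun (s : List Int × Int) t =>
        let d := PySem.Int.mod (s.2 + t) 4
        (s.1 ++ [d], d))
      (acc, d)).1 = acc ++ pvRest d ts := by
  induction ts with
  | nil => intro acc d; simp [pvRest]
  | cons t ts ih =>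
    intro acc d
    simp only [List.foldl_cons, pvRest]
    rw [ih, List.append_assoc]
    rfl

theorem foldPos_fst (ds : List Int) : ∀ (coords : List (Int × Int)) (x y : Int),
    (ds.foldl
      (fun (s : List (Int × Int) × Int × Int) d =>
        let v := stepVec d
        let x := s.2.1 + v.1
        let y := s.2.2 + v.2
        (s.1 ++ [(x, y)], x, y))
      (coords, x, y)).1 = coords ++ pvWalk x y ds := by
  induction ds with
  | nil => intro coords x y; simp [pvWalk]
  | cons d ds ih =>
    intro coords x y
    simp only [List.foldl_cons, pvWalk]
    rw [ih, List.append_assoc]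
    rfl

-- ===== VERDICT (by name: the statement is the Claim_ definition above) =====
theorem turnsToCoords_spec : Claim_equal_turnsToCoords := by
  intro turns _
  show turnsToCoords turns = turnsToCoords_alt turns
  unfold turnsToCoords turnsToCoords_alt
  rw [foldA_eq]
  have h1 := foldDirs_fst turns [1] 1
  simp only [h1, foldPos_fst]
  simp [pvWalk]
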